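-- pv_equiv track=rewrite | github.com/arvin580/SIBS | RNAseqMSMS/7-tandem-sv/predict-protein/5-msms-uniprot.py | peptide
-- ===== SOURCE A (Python) =====
-- def peptide(inL):
--     acids = ['A','R','D','C','Q','E','H','I','G','N','L','K','M','F','P','S','T','W','Y','V']
--     L = []
--     for item in inL :
--         if item.isupper():
--             flag1 = 0
--             flag2 = 0
--             for x in item:
--                 if x in acids:
--                     flag1 += 1
--                 if x  not in 'ATCG':
--                     flag2 += 1
--             if flag1 == len(item) and flag2:
--                 L.append(item)
--     return L
-- ===== SOURCE B (Python) =====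
-- def peptide(inL):
--     acids_set = set('ARDCQEHIGNLKMFPSTWYV')
--     atcg_set = set('ATCG')
--     L = []
--     for item in inL:
--         if item.isupper():
--             chars = set(item)
--             if chars <= acids_set and not chars <= atcg_set:
--                 L.append(item)
--     return L
-- ===== Notes on version B (the rewrite author's own statement) =====
-- stated objective: simpler
-- what changed: The inner per-character loop with two integer counting flags is replaced by building the set of the item's characters once and deciding with set-subset algebra (chars <= acids_set and not chars <= atcg_set).
import Mathlib
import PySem

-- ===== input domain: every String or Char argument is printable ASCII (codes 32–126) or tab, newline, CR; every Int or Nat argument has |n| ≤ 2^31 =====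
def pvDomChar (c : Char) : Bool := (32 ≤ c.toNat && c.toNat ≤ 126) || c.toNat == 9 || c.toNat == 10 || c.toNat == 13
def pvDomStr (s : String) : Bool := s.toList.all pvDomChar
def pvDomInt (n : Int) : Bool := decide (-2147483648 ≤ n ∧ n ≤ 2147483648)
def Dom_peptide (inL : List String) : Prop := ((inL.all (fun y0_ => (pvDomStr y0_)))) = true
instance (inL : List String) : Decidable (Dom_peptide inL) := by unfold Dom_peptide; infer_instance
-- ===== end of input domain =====

-- B replaces the inner two-flag counting loop by set-subset tests on the set of the item's characters (objective: simpler).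

-- hand port of Python str.isupper(): at least one cased char, no lowercase char; exact on the ASCII domain
def pyIsupperStr (cs : List Char) : Bool := cs.any PySem.Chars.isupper && !cs.any PySem.Chars.islower

-- ===== PORT A =====
def peptide (inL : List String) : List String :=
  let acids : List Char := ['A','R','D','C','Q','E','H','I','G','N','L','K','M','F','P','S','T','W','Y','V']
  inL.foldl (fun L item =>
    if pyIsupperStr item.toList then
      -- inner loop: two integer flags over the characters ('x in "ATCG"' on a single char = char membership, exact)
      let fl := item.toList.foldl (fun (p : Int × Int) x =>
        (if acids.contains x then p.1 + 1 else p.1,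
         if !("ATCG".toList.contains x) then p.2 + 1 else p.2)) (0, 0)
      if fl.1 == (item.toList.length : Int) && fl.2 != 0 then L ++ [item] else L
    else L) []

-- ===== PORT B =====
def peptide_alt (inL : List String) : List String :=
  let acidsSet : PySem.Set Char := PySem.Set.ofList "ARDCQEHIGNLKMFPSTWYV".toList
  let atcgSet : PySem.Set Char := PySem.Set.ofList "ATCG".toList
  inL.foldl (fun L item =>
    if pyIsupperStr item.toList then
      let chars := PySem.Set.ofList item.toList
      if PySem.Set.issubset chars acidsSet && !PySem.Set.issubset chars atcgSet then
        L ++ [item]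
      else L
    else L) []

-- ===== PRECONDITION & SPEC =====
def Spec_peptide (inL : List String) (out : List String) : Prop := out = peptide_alt inL
instance (inL : List String) (out : List String) : Decidable (Spec_peptide inL out) := by unfold Spec_peptide; infer_instance

-- ===== CLAIM (what is proved, stated in full; the proofs are below) =====
def Claim_equal_peptide : Prop := ∀ (inL : List String), Dom_peptide inL → Spec_peptide inL (peptide inL)

-- ===== LEMMAS AND PROOFS =====

def acidsL : List Char := ['A','R','D','C','Q','E','H','I','G','N','L','K','M','F','P','S','T','W','Y','V']

lemma inner_foldl (cs : List Char) (a b : Int) :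
    cs.foldl (fun (p : Int × Int) x =>
        (if acidsL.contains x then p.1 + 1 else p.1,
         if !("ATCG".toList.contains x) then p.2 + 1 else p.2)) (a, b)
    = (a + cs.countP (acidsL.contains ·), b + cs.countP (fun x => !("ATCG".toList.contains x))) := by
  induction cs generalizing a b with
  | nil => simp
  | cons c cs ih =>
    simp only [List.foldl_cons, List.countP_cons]
    rw [ih]
    rw [Prod.ext_iff]
    constructor <;> simp only [] <;> split_ifs <;> push_cast <;> ring

lemma issubset_ofList_iff (cs t : List Char) :
    PySem.Set.issubset (PySem.Set.ofList cs) (PySem.Set.ofList t) = true ↔ ∀ x ∈ cs, x ∈ t := by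
  simp only [PySem.Set.issubset, List.all_eq_true]
  constructor
  · intro h x hx
    have := h x ((PySem.Set.mem_ofList _ _).mpr hx)
    simpa [PySem.Set.contains, PySem.Set.mem_ofList] using this
  · intro h x hx
    have hx' := (PySem.Set.mem_ofList _ _).mp hx
    simpa [PySem.Set.contains, PySem.Set.mem_ofList] using h x hx'

lemma cond_eq (cs : List Char) :
    ((cs.foldl (fun (p : Int × Int) x =>
        (if acidsL.contains x then p.1 + 1 else p.1,
         if !("ATCG".toList.contains x) then p.2 + 1 else p.2)) (0, 0)).1 == (cs.length : Int)
      && (cs.foldl (fun (p : Int × Int) x =>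
        (if acidsL.contains x then p.1 + 1 else p.1,
         if !("ATCG".toList.contains x) then p.2 + 1 else p.2)) (0, 0)).2 != 0)
    = (PySem.Set.issubset (PySem.Set.ofList cs) (PySem.Set.ofList "ARDCQEHIGNLKMFPSTWYV".toList)
      && !PySem.Set.issubset (PySem.Set.ofList cs) (PySem.Set.ofList "ATCG".toList)) := by
  have hA : "ARDCQEHIGNLKMFPSTWYV".toList = acidsL := by decide
  rw [inner_foldl, Bool.eq_iff_iff, hA]
  simp only [Bool.and_eq_true, Bool.not_eq_true', beq_iff_eq, bne_iff_ne, ne_eq, zero_add,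
    Bool.eq_false_iff, issubset_ofList_iff]
  have hcnt1 : cs.countP (fun x => acidsL.contains x) = cs.length ↔ ∀ x ∈ cs, x ∈ acidsL := by
    rw [List.countP_eq_length]
    simp
  have hcnt2 : cs.countP (fun x => !("ATCG".toList.contains x)) = 0 ↔
      ∀ x ∈ cs, x ∈ "ATCG".toList := by
    rw [List.countP_eq_zero]
    simp only [Bool.not_eq_true', Bool.not_eq_false]
    constructor <;> intro h x hx <;> have := h x hx <;> simp_all
  constructor
  · rintro ⟨h1, h2⟩
    refine ⟨hcnt1.mp (by exact_mod_cast h1), fun hall => h2 ?_⟩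
    rw [hcnt2.mpr hall]
    simp
  · rintro ⟨h1, h2⟩
    refine ⟨by exact_mod_cast hcnt1.mpr h1, fun hz => h2 (hcnt2.mp (by exact_mod_cast hz))⟩

-- ===== VERDICT (by name: the statement is the Claim_ definition above) =====
theorem peptide_spec : Claim_equal_peptide := by
  intro inL _
  unfold Spec_peptide peptide peptide_alt
  simp only []
  have hf : ∀ (L : List String) (item : String),
      (if pyIsupperStr item.toList then
        let fl := item.toList.foldl (fun (p : Int × Int) x =>
          (if (['A','R','D','C','Q','E','H','I','G','N','L','K','M','F','P','S','T','W','Y','V'] : List Char).contains x then p.1 + 1 else p.1,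
           if !("ATCG".toList.contains x) then p.2 + 1 else p.2)) (0, 0)
        if fl.1 == (item.toList.length : Int) && fl.2 != 0 then L ++ [item] else L
      else L)
      = (if pyIsupperStr item.toList then
          if PySem.Set.issubset (PySem.Set.ofList item.toList) (PySem.Set.ofList "ARDCQEHIGNLKMFPSTWYV".toList)
             && !PySem.Set.issubset (PySem.Set.ofList item.toList) (PySem.Set.ofList "ATCG".toList) then
            L ++ [item]
          else L
        else L) := by
    intro L item
    by_cases hu : pyIsupperStr item.toList
    · simp only [hu, if_true]
      rw [show (['A','R','D','C','Q','E','H','I','G','N','L','K','M','F','P','S','T','W','Y','V'] : List Char) = acidsL from rfl]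
      rw [cond_eq]
    · simp [hu]
  simp only [hf]
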